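-- pv_equiv track=rewrite | github.com/fabian20ro/word-rarity-classifier | src/classificator/json_repair.py | _fix_trailing_decimal_points
-- ===== SOURCE A (Python) =====
-- def _fix_trailing_decimal_points(input_text: str) -> str:
--     out: list[str] = []
--     in_string = False
--     escaped = False
--     for i, ch in enumerate(input_text):
--         if in_string:
--             out.append(ch)
--             if escaped:
--                 escaped = False
--             elif ch == "\\":
--                 escaped = True
--             elif ch == '"':
--                 in_string = False
--             continue
--
--         if ch == '"':
--             in_string = True
--             out.append(ch)
--             continue
--
--         if ch == "." and i > 0 and input_text[i - 1].isdigit():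
--             nxt = input_text[i + 1] if i + 1 < len(input_text) else None
--             if nxt is None or not nxt.isdigit():
--                 out.append(".0")
--                 continue
--         out.append(ch)
--     return "".join(out)
-- ===== SOURCE B (Python) =====
-- def _fix_trailing_decimal_points(input_text: str) -> str:
--     # Segment-based rewrite: jump from quote to quote with str.find, copy each
--     # string literal wholesale, and fix trailing dots in the plain spans only.
--     def fix_plain(seg: str) -> str:
--         return "".join(
--             ".0" if c == "." and p.isdigit() and not n.isdigit() else c
--             for p, c, n in zip(" " + seg, seg, seg[1:] + " ")
--         )
--
--     parts = []
--     s = input_text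
--     n = len(s)
--     pos = 0
--     while True:
--         q = s.find('"', pos)
--         if q == -1:
--             parts.append(fix_plain(s[pos:]))
--             break
--         parts.append(fix_plain(s[pos:q]))
--         j = q + 1
--         while j < n:
--             if s[j] == "\\":
--                 j += 2
--             elif s[j] == '"':
--                 j += 1
--                 break
--             else:
--                 j += 1
--         parts.append(s[q:j])
--         if j >= n:
--             break
--         pos = j
--     return "".join(parts)
-- ===== Notes on version B (the rewrite author's own statement) =====
-- stated objective: idiomatic
-- what changed: A's per-character state machine with in_string/escaped flags is replaced by a segment scan: str.find jumps to each quote, every string literal is copied wholesale by an escape-skipping index scan, and trailing dots are fixed only inside the plain spans via a zip of neighbouring characters.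
import Mathlib
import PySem

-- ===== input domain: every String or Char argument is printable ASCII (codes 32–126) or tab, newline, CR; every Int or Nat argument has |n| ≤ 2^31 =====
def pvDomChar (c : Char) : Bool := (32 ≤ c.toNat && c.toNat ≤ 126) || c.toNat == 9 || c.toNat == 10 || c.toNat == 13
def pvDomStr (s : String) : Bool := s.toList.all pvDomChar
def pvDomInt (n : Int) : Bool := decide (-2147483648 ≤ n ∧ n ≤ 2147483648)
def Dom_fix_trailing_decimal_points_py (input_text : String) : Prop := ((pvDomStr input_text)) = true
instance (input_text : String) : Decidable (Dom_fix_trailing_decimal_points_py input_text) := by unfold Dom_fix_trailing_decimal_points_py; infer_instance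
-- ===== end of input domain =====

-- B replaces A's per-character in_string/escaped state machine by a segment scan (find the next
-- quote, copy the string literal wholesale, fix trailing dots in the plain spans via a zip of
-- neighbours); objective: idiomatic, same linear cost; return values proved equal everywhere.

-- ===== PORT A =====
-- one step of A's for-loop; state (out, in_string, escaped), p = (i, ch) from enumerate
def pvAStep (cs : List Char) (st : List String × Bool × Bool) (p : Int × Char) : List String × Bool × Bool :=
  let out := st.1; let in_string := st.2.1; let escaped := st.2.2
  let i := p.1; let ch := p.2
  if in_string then
    let out := out ++ [ch.toString]
    if escaped then (out, in_string, false)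
    else if ch = '\\' then (out, in_string, true)
    else if ch = '"' then (out, false, escaped)
    else (out, in_string, escaped)
  else if ch = '"' then (out ++ [ch.toString], true, escaped)
  else if ch == '.' && decide (0 < i) && PySem.Chars.isdigit (PySem.List.pyGetD cs (i - 1) ' ') then
    -- nxt = input_text[i+1] if i+1 < len(input_text) else None
    let nxt : Option Char := if i + 1 < (cs.length : Int) then PySem.List.pyGet? cs (i + 1) else none
    if (match nxt with | none => true | some c => !PySem.Chars.isdigit c) then
      (out ++ [".0"], in_string, escaped)
    else (out ++ [ch.toString], in_string, escaped)
  else (out ++ [ch.toString], in_string, escaped)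

def fix_trailing_decimal_points_py (input_text : String) : String :=
  let cs := input_text.toList
  let res := (PySem.List.enumerate cs 0).foldl (pvAStep cs) ([], false, false)
  String.join res.1

-- ===== PORT B =====
-- fix_plain: ".0" for a dot with a digit before and no digit after, via zip(' '+seg, seg, seg[1:]+' ')
def pvFixPlain (seg : List Char) : String :=
  String.join (((((' ' :: seg).zip seg).zip (seg.drop 1 ++ [' '])).map
    (fun pcn => if pcn.1.2 == '.' && PySem.Chars.isdigit pcn.1.1 && !PySem.Chars.isdigit pcn.2
                then ".0" else pcn.1.2.toString)))

-- the inner while loop: scan past escape pairs up to the closing quote; returns the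
-- slices (s[q+1:j], s[j:]) that Source B obtains from the final index j
def pvScanStr : List Char → List Char × List Char
  | [] => ([], [])
  | '\\' :: [] => (['\\'], [])
  | '\\' :: d :: rest' => ('\\' :: d :: (pvScanStr rest').1, (pvScanStr rest').2)
  | c :: rest => if c = '"' then ([c], rest) else (c :: (pvScanStr rest).1, (pvScanStr rest).2)

-- needed by pvGoB's termination proof
theorem pvScanStr_snd_le (l : List Char) : (pvScanStr l).2.length ≤ l.length := by
  induction l using pvScanStr.induct <;> simp_all [pvScanStr] <;> omega

-- the outer while loop, acting on the remaining suffix s[pos:]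
def pvGoB (s : List Char) : List String :=
  match h : s.findIdx? (· == '"') with
  | none => [pvFixPlain s]
  | some q =>
    let rest := s.drop (q + 1)
    let p := pvScanStr rest
    pvFixPlain (s.take q) :: String.ofList ('"' :: p.1) :: pvGoB p.2
termination_by s.length
decreasing_by
  have hq : q < s.length := by
    rcases List.findIdx?_eq_some_iff_getElem.mp h with ⟨hlt, _⟩; exact hlt
  have := pvScanStr_snd_le (s.drop (q + 1))
  simp at this ⊢; omega

def fix_trailing_decimal_points_py_alt (input_text : String) : String :=
  String.join (pvGoB input_text.toList)

-- ===== PRECONDITION & SPEC =====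
def Spec_fix_trailing_decimal_points_py (input_text : String) (out : String) : Prop := out = fix_trailing_decimal_points_py_alt input_text
instance (input_text : String) (out : String) : Decidable (Spec_fix_trailing_decimal_points_py input_text out) := by unfold Spec_fix_trailing_decimal_points_py; infer_instance

-- ===== CLAIM (what is proved, stated in full; the proofs are below) =====
def Claim_equal_fix_trailing_decimal_points_py : Prop := ∀ (input_text : String), Dom_fix_trailing_decimal_points_py input_text → Spec_fix_trailing_decimal_points_py input_text (fix_trailing_decimal_points_py input_text)

-- ===== LEMMAS AND PROOFS =====

-- "head of l is a digit" (headD ' ' since ' ' is not a digit)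
def pvHeadDig (l : List Char) : Bool := PySem.Chars.isdigit (l.headD ' ')

-- "character before index k in cs is a digit" — exactly A's guard at i = k
def pvPrevD (cs : List Char) (k : Nat) : Bool :=
  decide (0 < (k : Int)) && PySem.Chars.isdigit (PySem.List.pyGetD cs ((k : Int) - 1) ' ')

-- A's loop as a recursion over the remaining suffix, output as plain characters
def pvARec : Bool → Bool → Bool → List Char → List Char
  | _, _, _, [] => []
  | inS, esc, pD, ch :: rest =>
    if inS then
      ch :: (if esc then pvARec true false (PySem.Chars.isdigit ch) rest
             else if ch = '\\' then pvARec true true (PySem.Chars.isdigit ch) rest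
             else if ch = '"' then pvARec false esc (PySem.Chars.isdigit ch) rest
             else pvARec true esc (PySem.Chars.isdigit ch) rest)
    else if ch = '"' then ch :: pvARec true esc (PySem.Chars.isdigit ch) rest
    else if ch == '.' && pD && !pvHeadDig rest then
      '.' :: '0' :: pvARec false esc (PySem.Chars.isdigit ch) rest
    else ch :: pvARec false esc (PySem.Chars.isdigit ch) rest

-- B's fix_plain as a recursion carrying "previous char is a digit"
def pvFP : Bool → List Char → List Char
  | _, [] => []
  | pD, c :: rest =>
    (if c == '.' && pD && !pvHeadDig rest then ['.', '0'] else [c]) ++ pvFP (PySem.Chars.isdigit c) rest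

-- "is the last char of (pD-context ++ pre) a digit"
def pvLastD : Bool → List Char → Bool
  | pD, [] => pD
  | _, c :: rest => pvLastD (PySem.Chars.isdigit c) rest

theorem pv_toList_toString (c : Char) : (Char.toString c).toList = [c] :=
  Eq.symm ((fun {l} {s} => String.ofList_eq.mp) rfl)

theorem pv_drop_succ {cs : List Char} {k : Nat} {c : Char} {suf : List Char}
    (h : cs.drop k = c :: suf) : cs.drop (k + 1) = suf := by
  have h2 : List.drop 1 (List.drop k cs) = List.drop (k + 1) cs := by rw [List.drop_drop]
  rw [← h2, h]; simp

theorem pv_get_of_drop {cs : List Char} {k : Nat} {c : Char} {suf : List Char}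
    (h : cs.drop k = c :: suf) : cs[k]? = some c := by
  have h2 : (List.drop k cs)[0]? = cs[k + 0]? := List.getElem?_drop
  rw [h] at h2; simpa using h2.symm

theorem pvPrevD_succ {cs : List Char} {k : Nat} {c : Char} (h : cs[k]? = some c) :
    pvPrevD cs (k + 1) = PySem.Chars.isdigit c := by
  unfold pvPrevD
  have h1 : ((k + 1 : Nat) : Int) - 1 = (k : Nat) := by push_cast; ring
  rw [h1, PySem.List.pyGetD_natCast]
  have h2 : cs.getD k ' ' = c := by rw [List.getD_eq_getElem?_getD, h]; rfl
  rw [h2]; simp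

theorem pvNxt {cs : List Char} {k : Nat} {suf : List Char} (h : cs.drop (k + 1) = suf) :
    (if (k : Int) + 1 < (cs.length : Int) then PySem.List.pyGet? cs ((k : Int) + 1) else none)
      = suf.head? := by
  have hh : suf.head? = cs[k + 1]? := by
    rw [← h, List.head?_eq_getElem?]
    have := @List.getElem?_drop Char cs (k + 1) 0
    simpa using this
  rw [hh]
  by_cases hlt : k + 1 < cs.length
  · rw [if_pos (by exact_mod_cast hlt)]
    have : (k : Int) + 1 = ((k + 1 : Nat) : Int) := by push_cast; ring
    rw [this, PySem.List.pyGet?_natCast]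
  · rw [if_neg (by exact_mod_cast hlt)]
    rw [List.getElem?_eq_none (by omega)]

theorem pvMatchHead (suf : List Char) :
    (match suf.head? with | none => true | some c => !PySem.Chars.isdigit c) = !pvHeadDig suf := by
  cases suf <;> simp [pvHeadDig] <;> decide

theorem pv_toList_dot0 : (".0" : String).toList = ['.', '0'] := rfl

-- A's fold equals pvARec (flattened)
theorem pvG (cs : List Char) : ∀ (suf : List Char) (k : Nat) (out : List String) (inS esc : Bool),
    cs.drop k = suf →
    ((((PySem.List.enumerate suf (k : Int)).foldl (pvAStep cs) (out, inS, esc)).1.map String.toList).flatten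
      = (out.map String.toList).flatten ++ pvARec inS esc (pvPrevD cs k) suf) := by
  intro suf
  induction suf with
  | nil => intro k out inS esc _; simp [PySem.List.enumerate_nil, pvARec]
  | cons c suf' ih =>
    intro k out inS esc hdrop
    have hk1 : cs.drop (k + 1) = suf' := pv_drop_succ hdrop
    have hget : cs[k]? = some c := pv_get_of_drop hdrop
    have hprev : pvPrevD cs (k + 1) = PySem.Chars.isdigit c := pvPrevD_succ hget
    have hcast : (k : Int) + 1 = ((k + 1 : Nat) : Int) := by push_cast; ring
    rw [PySem.List.enumerate_cons, List.foldl_cons]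
    by_cases hin : inS = true
    · subst hin
      by_cases hesc : esc = true
      · subst hesc
        have hstep : pvAStep cs (out, true, true) ((k : Int), c)
            = (out ++ [c.toString], true, false) := by simp [pvAStep]
        rw [hstep, hcast, ih (k + 1) _ _ _ hk1, hprev]
        simp [pvARec, pv_toList_toString]
      · replace hesc : esc = false := by revert hesc; cases esc <;> simp
        subst hesc
        by_cases hbs : c = '\\'
        · subst hbs
          have hstep : pvAStep cs (out, true, false) ((k : Int), '\\')
              = (out ++ [Char.toString '\\'], true, true) := by simp [pvAStep]
          rw [hstep, hcast, ih (k + 1) _ _ _ hk1, hprev]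
          simp [pvARec, pv_toList_toString]
        · by_cases hq : c = '"'
          · subst hq
            have hstep : pvAStep cs (out, true, false) ((k : Int), '"')
                = (out ++ [Char.toString '"'], false, false) := by simp [pvAStep]
            rw [hstep, hcast, ih (k + 1) _ _ _ hk1, hprev]
            simp [pvARec, pv_toList_toString]
          · have hstep : pvAStep cs (out, true, false) ((k : Int), c)
                = (out ++ [c.toString], true, false) := by simp [pvAStep, hbs, hq]
            rw [hstep, hcast, ih (k + 1) _ _ _ hk1, hprev]
            simp [pvARec, pv_toList_toString, hbs, hq]
    · replace hin : inS = false := by revert hin; cases inS <;> simp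
      subst hin
      by_cases hq : c = '"'
      · subst hq
        have hstep : pvAStep cs (out, false, esc) ((k : Int), '"')
            = (out ++ [Char.toString '"'], true, esc) := by simp [pvAStep]
        rw [hstep, hcast, ih (k + 1) _ _ _ hk1, hprev]
        simp [pvARec, pv_toList_toString]
      · have hnxt := pvNxt hk1
        by_cases hdot : (c == '.' && decide (0 < (k : Int))
              && PySem.Chars.isdigit (PySem.List.pyGetD cs ((k : Int) - 1) ' ')) = true
        · by_cases hnd : pvHeadDig suf' = true
          · have hstep : pvAStep cs (out, false, esc) ((k : Int), c)
                = (out ++ [c.toString], false, esc) := by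
              simp only [pvAStep]
              rw [if_neg (by decide : ¬(false = true)), if_neg hq, if_pos hdot, hnxt,
                pvMatchHead, hnd]
              simp
            rw [hstep, hcast, ih (k + 1) _ _ _ hk1, hprev]
            have hc1 : (c == '.' && pvPrevD cs k && !pvHeadDig suf') = false := by
              rw [hnd]; simp
            rw [pvARec]
            rw [if_neg (by simp), if_neg hq, if_neg (by rw [hc1]; simp)]
            simp [pv_toList_toString]
          · replace hnd : pvHeadDig suf' = false := by revert hnd; cases pvHeadDig suf' <;> simp
            have hstep : pvAStep cs (out, false, esc) ((k : Int), c)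
                = (out ++ [".0"], false, esc) := by
              simp only [pvAStep]
              rw [if_neg (by decide : ¬(false = true)), if_neg hq, if_pos hdot, hnxt,
                pvMatchHead, hnd]
              simp
            rw [hstep, hcast, ih (k + 1) _ _ _ hk1, hprev]
            have hc1 : (c == '.' && pvPrevD cs k && !pvHeadDig suf') = true := by
              rw [hnd, pvPrevD]
              revert hdot
              cases h1 : (c == '.') <;> cases h2 : decide (0 < (k : Int)) <;>
                cases h3 : PySem.Chars.isdigit (PySem.List.pyGetD cs ((k : Int) - 1) ' ') <;> simp
            have hcc : c = '.' := by
              revert hdot; cases hc : (c == '.') <;> simp_all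
            rw [pvARec]
            rw [if_neg (by simp), if_neg hq, if_pos (by rw [hc1])]
            subst hcc
            simp [pv_toList_dot0]
        · rw [Bool.not_eq_true] at hdot
          have hstep : pvAStep cs (out, false, esc) ((k : Int), c)
              = (out ++ [c.toString], false, esc) := by
            simp only [pvAStep]
            rw [if_neg (by decide : ¬(false = true)), if_neg hq]
            rw [if_neg (show ¬((c == '.' && decide (0 < (k : Int))
              && PySem.Chars.isdigit (PySem.List.pyGetD cs ((k : Int) - 1) ' ')) = true) from by
                rw [hdot]; simp)]
          rw [hstep, hcast, ih (k + 1) _ _ _ hk1, hprev]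
          have hc1 : (c == '.' && pvPrevD cs k && !pvHeadDig suf') = false := by
            rw [pvPrevD]
            revert hdot
            cases h1 : (c == '.') <;> cases h2 : decide (0 < (k : Int)) <;>
              cases h3 : PySem.Chars.isdigit (PySem.List.pyGetD cs ((k : Int) - 1) ' ') <;> simp_all
          rw [pvARec]
          rw [if_neg (by simp), if_neg hq, if_neg (by rw [hc1]; simp)]
          simp [pv_toList_toString]

-- B's zip comprehension equals pvFP (generalised over the left pad character)
theorem pvZipFP : ∀ (seg : List Char) (p : Char),
    (((((p :: seg).zip seg).zip (seg.drop 1 ++ [' '])).map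
      (fun pcn => if pcn.1.2 == '.' && PySem.Chars.isdigit pcn.1.1 && !PySem.Chars.isdigit pcn.2
                  then ".0" else pcn.1.2.toString)).map String.toList).flatten
      = pvFP (PySem.Chars.isdigit p) seg := by
  intro seg
  induction seg with
  | nil => intro p; simp [pvFP]
  | cons c rest ih =>
    intro p
    cases rest with
    | nil =>
      have hsp : PySem.Chars.isdigit ' ' = false := by decide
      by_cases h1 : c = '.' <;> cases h2 : PySem.Chars.isdigit p <;>
        simp [pvFP, pvHeadDig, h1, h2, hsp, pv_toList_dot0]
    | cons r rs =>
      have ih2 := ih c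
      simp only [List.zip_cons_cons, List.drop, List.cons_append, List.map_cons,
        List.flatten_cons] at ih2 ⊢
      rw [ih2]
      simp only [pvFP, pvHeadDig, List.headD]
      by_cases h : (c == '.' && PySem.Chars.isdigit p && !PySem.Chars.isdigit r) = true
      · rw [if_pos h, if_pos h]; simp [pv_toList_dot0]
      · rw [if_neg h, if_neg h]; simp [pv_toList_toString]

theorem pvFixPlain_toList (seg : List Char) : (pvFixPlain seg).toList = pvFP false seg := by
  unfold pvFixPlain
  rw [String.toList_join]
  have := pvZipFP seg ' '
  simpa using this

-- pvARec crosses a quote-free plain prefix as pvFP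
theorem pvPlainCat : ∀ (pre l : List Char) (pD esc : Bool), '"' ∉ pre → pvHeadDig l = false →
    pvARec false esc pD (pre ++ l) = pvFP pD pre ++ pvARec false esc (pvLastD pD pre) l := by
  intro pre
  induction pre with
  | nil => intro l pD esc _ _; simp [pvFP, pvLastD]
  | cons c pre' ih =>
    intro l pD esc hq hl
    have hcq : ¬c = '"' := by intro h; exact hq (by simp [h])
    have hq' : '"' ∉ pre' := fun h => hq (List.mem_cons_of_mem _ h)
    have hhd : pvHeadDig (pre' ++ l) = pvHeadDig pre' := by
      cases pre' with
      | nil => simpa [pvHeadDig] using hl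
      | cons a b => simp [pvHeadDig]
    simp only [List.cons_append]
    rw [pvARec]
    rw [if_neg (by simp), if_neg hcq]
    rw [hhd, ih l _ esc hq' hl]
    simp only [pvFP, pvLastD]
    by_cases h : (c == '.' && pD && !pvHeadDig pre') = true
    · rw [if_pos h, if_pos h]; simp
    · rw [if_neg h, if_neg h]; simp

-- pvARec inside a string equals pvScanStr's split
theorem pvStrScan : ∀ (l : List Char) (x : Bool),
    pvARec true false x l = (pvScanStr l).1 ++ pvARec false false false (pvScanStr l).2 := by
  intro l
  induction l using pvScanStr.induct with
  | case1 => intro x; simp [pvScanStr, pvARec]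
  | case2 => intro x; simp [pvScanStr, pvARec]
  | case3 d rest' ih => intro x; simp [pvScanStr, pvARec, ih]
  | case4 rest h1 h2 =>
    intro x
    have hd : PySem.Chars.isdigit '"' = false := by decide
    simp [pvScanStr, pvARec, hd]
  | case5 c rest h1 h2 hq ih =>
    intro x
    have hbs : ¬c = '\\' := by
      intro h; subst h
      cases rest with
      | nil => exact h1 rfl rfl
      | cons d r => exact h2 d r rfl rfl
    simp [pvScanStr, pvARec, hbs, hq, ih]

theorem pvGoB_chars : ∀ (s : List Char), ((pvGoB s).map String.toList).flatten = pvARec false false false s := by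
  intro s
  induction s using pvGoB.induct with
  | case1 s h =>
    have hnot : '"' ∉ s := by
      intro hm
      have := List.findIdx?_eq_none_iff.mp h '"' hm
      simp at this
    rw [pvGoB, h]
    have hcat := pvPlainCat s [] false false hnot (by decide)
    simp only [List.append_nil] at hcat
    rw [hcat]
    simp [pvFixPlain_toList, pvARec]
  | case2 s q h rest pq ih =>
    rcases List.findIdx?_eq_some_iff_getElem.mp h with ⟨hq, hp, hbef⟩
    simp only [beq_iff_eq] at hp
    have hsplit : s = s.take q ++ '"' :: s.drop (q + 1) := by
      conv_lhs => rw [← List.take_append_drop q s]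
      congr 1
      rw [List.drop_eq_getElem_cons hq, hp]
    have hnotin : '"' ∉ s.take q := by
      intro hm
      rcases List.mem_iff_getElem.mp hm with ⟨j, hj, hjs⟩
      have hjq : j < q := by simp at hj; omega
      have hsj : s[j]'(by omega) = '"' := by rw [← hjs]; simp [List.getElem_take]
      exact hbef j hjq (by simp [hsj])
    rw [pvGoB, h]
    simp only [List.map_cons, List.flatten_cons, String.toList_ofList, pvFixPlain_toList]
    conv_rhs => rw [hsplit]
    have hhd : pvHeadDig ('"' :: s.drop (q + 1)) = false := by
      simp [pvHeadDig]; decide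
    rw [pvPlainCat (s.take q) ('"' :: s.drop (q + 1)) false false hnotin hhd]
    rw [pvARec]
    rw [if_neg (by simp), if_pos rfl]
    rw [show PySem.Chars.isdigit '"' = false from by decide]
    rw [pvStrScan (s.drop (q + 1)) false]
    simp
    exact ih

-- ===== VERDICT (by name: the statement is the Claim_ definition above) =====
theorem fix_trailing_decimal_points_py_spec : Claim_equal_fix_trailing_decimal_points_py := by
  unfold Claim_equal_fix_trailing_decimal_points_py Spec_fix_trailing_decimal_points_py
  intro input_text _
  unfold fix_trailing_decimal_points_py fix_trailing_decimal_points_py_alt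
  apply String.toList_inj.mp
  rw [String.toList_join, String.toList_join]
  have hA := pvG input_text.toList input_text.toList 0 [] false false (by simp)
  have h0 : ((0 : Nat) : Int) = 0 := by norm_num
  rw [h0] at hA
  have hpd : pvPrevD input_text.toList 0 = false := by simp [pvPrevD]
  rw [hpd] at hA
  simp only [List.map_nil, List.flatten_nil, List.nil_append] at hA
  rw [hA, pvGoB_chars]
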